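-- pv_equiv track=rewrite | github.com/Shoreline/interview2021 | Array/Count Number of Pairs With Absolute Difference K.py | count
-- ===== SOURCE A (Python) =====
-- import collections
-- from typing import List
--
-- def count(nums: List[int], k: int) -> int:
--     cnt_in_window = collections.defaultdict(int)
--     res = 0
--     for i, num in enumerate(nums):
--         res += cnt_in_window[num]
--
--         cnt_in_window[num] += 1
--         if i >= k:
--             cnt_in_window[nums[i - k]] -= 1
--
--     return res
-- ===== SOURCE B (Python) =====
-- from typing import List
--
-- def count(nums: List[int], k: int) -> int:
--     res = 0
--     for j, x in enumerate(nums):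
--         lo = max(j - k, 0)
--         res += nums[lo:j].count(x)
--     return res
-- ===== Notes on version B (the rewrite author's own statement) =====
-- stated objective: simpler
-- what changed: Replaced the incrementally-maintained sliding-window hash counter with a direct per-index count of the current element in the slice of the preceding min(i,k) elements.
import Mathlib
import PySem

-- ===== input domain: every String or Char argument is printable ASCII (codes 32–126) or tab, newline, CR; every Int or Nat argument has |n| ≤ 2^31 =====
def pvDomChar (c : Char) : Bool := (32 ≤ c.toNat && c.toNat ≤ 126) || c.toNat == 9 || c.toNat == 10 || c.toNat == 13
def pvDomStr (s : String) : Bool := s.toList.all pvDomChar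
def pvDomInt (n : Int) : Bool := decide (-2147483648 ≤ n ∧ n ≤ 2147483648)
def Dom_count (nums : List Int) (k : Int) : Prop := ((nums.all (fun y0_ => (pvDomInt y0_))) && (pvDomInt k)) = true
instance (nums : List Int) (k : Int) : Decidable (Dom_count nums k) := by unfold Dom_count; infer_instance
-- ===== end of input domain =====

-- B replaces A's incrementally-maintained sliding-window hash counter by a per-index
-- count over the slice of the preceding k elements (simpler, no mutable dict).

-- ===== PORT A =====
-- Sliding-window hash counter, step for step; the defaultdict read-then-increment is
-- ported as a single insert (only the stored value, never the dict order, is used).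
def count (nums : List Int) (k : Int) : Int :=
  ((PySem.List.enumerate nums 0).foldl
    (fun (st : PySem.Dict Int Int × Int) p =>
      let c := st.1.getD p.2 0
      let res := st.2 + c
      let d := st.1.insert p.2 (c + 1)
      if p.1 ≥ k then
        match PySem.List.pyGet? nums (p.1 - k) with
        | some v => (d.insert v (d.getD v 0 - 1), res)
        | none => (d, res)  -- Python raises IndexError here; excluded by Pre_count
      else (d, res))
    (PySem.Dict.empty, 0)).2

-- ===== PORT B =====
def count_alt (nums : List Int) (k : Int) : Int :=
  (PySem.List.enumerate nums 0).foldl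
    (fun (res : Int) p =>
      let lo := max (p.1 - k) 0
      res + ((PySem.List.count (PySem.List.slice nums (some lo) (some p.1)) p.2 : Nat) : Int))
    0

-- ===== PRECONDITION & SPEC =====
-- Pre_count excludes k < 0 with nonempty nums: there A's window decrement indexes
-- nums[i+|k|] and raises IndexError on the last iterations.
def Pre_count (nums : List Int) (k : Int) : Prop := 0 ≤ k ∨ nums = []
instance (nums : List Int) (k : Int) : Decidable (Pre_count nums k) := by unfold Pre_count; infer_instance
def pvWitness_count : List Int × Int := ([1, 2, 1, 2, 1], 2)

def Spec_count (nums : List Int) (k : Int) (out : Int) : Prop := out = count_alt nums k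
instance (nums : List Int) (k : Int) (out : Int) : Decidable (Spec_count nums k out) := by unfold Spec_count; infer_instance

-- ===== CLAIM (what is proved, stated in full; the proofs are below) =====
def Claim_equal_count : Prop := ∀ (nums : List Int) (k : Int), Dom_count nums k → Pre_count nums k → Spec_count nums k (count nums k)

-- ===== LEMMAS AND PROOFS =====

-- the two loop bodies, named for the proofs
def astep (nums : List Int) (k : Int) : PySem.Dict Int Int × Int → Int × Int → PySem.Dict Int Int × Int :=
  fun st p =>
    let c := st.1.getD p.2 0
    let res := st.2 + c
    let d := st.1.insert p.2 (c + 1)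
    if p.1 ≥ k then
      match PySem.List.pyGet? nums (p.1 - k) with
      | some v => (d.insert v (d.getD v 0 - 1), res)
      | none => (d, res)
    else (d, res)

def bstep (nums : List Int) (k : Int) : Int → Int × Int → Int :=
  fun res p =>
    let lo := max (p.1 - k) 0
    res + ((PySem.List.count (PySem.List.slice nums (some lo) (some p.1)) p.2 : Nat) : Int)

theorem count_eq_fold (nums : List Int) (k : Int) :
    count nums k = ((PySem.List.enumerate nums 0).foldl (astep nums k) (PySem.Dict.empty, 0)).2 := rfl

theorem count_alt_eq_fold (nums : List Int) (k : Int) :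
    count_alt nums k = (PySem.List.enumerate nums 0).foldl (bstep nums k) 0 := rfl

-- the window of the (at most) k elements preceding index m
def win (nums : List Int) (kN m : Nat) : List Int := (nums.take m).drop (m - kN)

theorem slice_eq_win (nums : List Int) (k : Int) (hk : 0 ≤ k) (m : Nat) :
    PySem.List.slice nums (some (max ((m : Int) - k) 0)) (some (m : Int)) = win nums k.toNat m := by
  have h : max ((m : Int) - k) 0 = ((m - k.toNat : Nat) : Int) := by omega
  rw [h, PySem.List.slice_natCast, win, List.drop_take]

theorem countW_succ (nums : List Int) (kN m : Nat) (hm : m < nums.length) (v : Int) :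
    ((win nums kN (m + 1)).count v : Int)
      = ((win nums kN m).count v : Int)
        + (if nums[m] = v then 1 else 0)
        - (if kN ≤ m then (if nums[m - kN]'(by omega) = v then 1 else 0) else 0) := by
  have htake : nums.take (m + 1) = nums.take m ++ [nums[m]] := by
    rw [List.take_add_one]; simp [List.getElem?_eq_getElem hm]
  have hlt : (nums.take m).length = m := by simp; omega
  by_cases hk : kN ≤ m
  · by_cases hk0 : kN = 0
    · subst hk0
      have h1 : win nums 0 m = [] := by
        simp [win]
      have h2 : win nums 0 (m + 1) = [] := by
        simp [win]
      simp [h1, h2, hk]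
    · have ha : m - kN < m := by omega
      have hwm : win nums kN m = nums[m - kN] :: (nums.take m).drop (m - kN + 1) := by
        rw [win, List.drop_eq_getElem_cons (by omega)]
        congr 1
        exact List.getElem_take
      have hwm1 : win nums kN (m + 1) = (nums.take m).drop (m - kN + 1) ++ [nums[m]] := by
        rw [win, htake]
        have : m + 1 - kN = (m - kN) + 1 := by omega
        rw [this, List.drop_append_of_le_length (by omega)]
      rw [hwm, hwm1]
      simp only [List.count_cons, List.count_append, List.count_nil, beq_iff_eq, if_pos hk]
      push_cast
      split_ifs <;> omega
  · have h1 : m - kN = 0 := by omega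
    have h2 : m + 1 - kN = 0 := by omega
    rw [if_neg hk]
    rw [win, win, h1, h2, List.drop_zero, List.drop_zero, htake]
    simp only [List.count_append, List.count_nil, List.count_cons, beq_iff_eq]
    push_cast
    split_ifs <;> omega

theorem dict_step (x y v cx cy cv : Int)
    (hxy : x = y → cx = cy) (hvx : v = x → cv = cx) (hvy : v = y → cv = cy) :
    (if v = y then (if y = x then cx + 1 else cy) - 1 else if v = x then cx + 1 else cv)
      = cv + (if x = v then 1 else 0) - (if y = v then 1 else 0) := by
  rcases eq_or_ne v y with h1 | h1
  · rcases eq_or_ne y x with h3 | h3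
    · have e1 := hvy h1
      have e2 := hxy h3.symm
      simp [h1, h3]
      omega
    · have e1 := hvy h1
      simp [h1, h3, Ne.symm h3]
      omega
  · rcases eq_or_ne v x with h2 | h2
    · have e1 := hvx h2
      have hxy2 : x ≠ y := fun h => h1 (h2.trans h)
      simp [h2, hxy2, Ne.symm hxy2]
      omega
    · simp [h1, h2, Ne.symm h1, Ne.symm h2]

theorem dict_step2 (x v cx cv : Int) (hvx : v = x → cv = cx) :
    (if v = x then cx + 1 else cv) = cv + (if x = v then 1 else 0) := by
  rcases eq_or_ne v x with h | h
  · have := hvx h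
    simp [h]
    omega
  · simp [h, Ne.symm h]

theorem invariant (nums : List Int) (k : Int) (hk : 0 ≤ k) (m : Nat) (hm : m ≤ nums.length) :
    (∀ v, (((PySem.List.enumerate nums 0).take m).foldl (astep nums k) (PySem.Dict.empty, 0)).1.getD v 0
            = ((win nums k.toNat m).count v : Int))
    ∧ (((PySem.List.enumerate nums 0).take m).foldl (astep nums k) (PySem.Dict.empty, 0)).2
        = ((PySem.List.enumerate nums 0).take m).foldl (bstep nums k) 0 := by
  induction m with
  | zero =>
    constructor
    · intro v
      simp [win, PySem.Dict.getD, PySem.Dict.get?, PySem.Dict.empty]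
    · rfl
  | succ m ih =>
    have hm' : m < nums.length := by omega
    obtain ⟨ihd, ihr⟩ := ih (by omega)
    have hlen : m < (PySem.List.enumerate nums 0).length := by
      rw [PySem.List.length_enumerate]; omega
    have htake : (PySem.List.enumerate nums 0).take (m + 1)
        = (PySem.List.enumerate nums 0).take m ++ [((m : Int), nums[m])] := by
      rw [List.take_add_one]
      simp [List.getElem?_eq_getElem hlen, PySem.List.getElem_enumerate]
    rw [htake, List.foldl_append, List.foldl_append]
    set st := ((PySem.List.enumerate nums 0).take m).foldl (astep nums k) (PySem.Dict.empty, 0) with hst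
    simp only [List.foldl_cons, List.foldl_nil]
    have hguard : (((m : Int)) ≥ k) ↔ k.toNat ≤ m := by omega
    -- the B-side increment equals the count of nums[m] in the window
    have hbinc : bstep nums k (List.foldl (bstep nums k) 0 ((PySem.List.enumerate nums 0).take m)) ((m : Int), nums[m])
        = List.foldl (bstep nums k) 0 ((PySem.List.enumerate nums 0).take m)
          + ((win nums k.toNat m).count nums[m] : Int) := by
      show _ + _ = _ + _
      rw [slice_eq_win nums k hk m, PySem.List.count_eq]
    by_cases hg : ((m : Int)) ≥ k
    · -- window decrement fires
      have hkm : k.toNat ≤ m := hguard.mp hg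
      have hidx : (m : Int) - k = ((m - k.toNat : Nat) : Int) := by omega
      have hidx2 : m - k.toNat < nums.length := by omega
      have hget : PySem.List.pyGet? nums ((m : Int) - k) = some (nums[m - k.toNat]'hidx2) := by
        rw [hidx, PySem.List.pyGet?_natCast, List.getElem?_eq_getElem hidx2]
      constructor
      · intro v
        simp only [astep, hg, if_pos, hget]
        simp only [PySem.Dict.getD_insert]
        rw [countW_succ nums k.toNat m hm' v]
        rw [if_pos hkm, ← ihd v]
        exact dict_step nums[m] (nums[m - k.toNat]'hidx2) v _ _ _
          (fun h => by rw [h]) (fun h => by rw [h]) (fun h => by rw [h])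
      · simp only [astep, hg, if_pos, hget]
        rw [hbinc, ← ihr, ← ihd nums[m]]
    · constructor
      · intro v
        simp only [astep, hg, ite_false]
        simp only [PySem.Dict.getD_insert]
        rw [countW_succ nums k.toNat m hm' v]
        have hkm : ¬ k.toNat ≤ m := fun h => hg (hguard.mpr h)
        rw [if_neg hkm, ← ihd v, sub_zero]
        exact dict_step2 nums[m] v _ _ (fun h => by rw [h])
      · simp only [astep, hg, ite_false]
        rw [hbinc, ← ihr, ← ihd nums[m]]

-- ===== VERDICT (by name: the statement is the Claim_ definition above) =====
theorem count_spec : Claim_equal_count := by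
  intro nums k _ hpre
  unfold Spec_count
  rcases hpre with hk | hnil
  · have h := (invariant nums k hk nums.length le_rfl).2
    have hfull : (PySem.List.enumerate nums 0).take nums.length = PySem.List.enumerate nums 0 := by
      apply List.take_of_length_le
      rw [PySem.List.length_enumerate]
    rw [count_eq_fold, count_alt_eq_fold, ← hfull, h]
  · subst hnil; rfl
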